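-- pv_equiv track=rewrite | github.com/Treawp/gazcc-agent- | agent/github_tool.py | _detect_architecture
-- ===== SOURCE A (Python) =====
-- def _detect_architecture(paths: set) -> list[str]:
--     """Deteksi pola arsitektur dari nama file/folder."""
--     hints = []
--
--     # Framework detection
--     if "package.json" in paths:
--         if any("next.config" in p for p in paths):
--             hints.append("Next.js project")
--         elif any("vite.config" in p for p in paths):
--             hints.append("Vite-based frontend")
--         elif any("nuxt.config" in p for p in paths):
--             hints.append("Nuxt.js project")
--         else:
--             hints.append("Node.js / npm project")
--
--     if any(p.endswith("requirements.txt") or p == "pyproject.toml" or p.endswith("setup.py") for p in paths):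
--         if any("fastapi" in p or "app.py" in p or "main.py" in p for p in paths):
--             hints.append("Python web app (likely FastAPI/Flask/Django)")
--         elif any("train" in p or "model" in p or "notebook" in p or p.endswith(".ipynb") for p in paths):
--             hints.append("Python ML/Data Science project")
--         else:
--             hints.append("Python project")
--
--     if "Cargo.toml" in paths:
--         hints.append("Rust project (Cargo)")
--     if "go.mod" in paths:
--         hints.append("Go module project")
--     if "pom.xml" in paths or "build.gradle" in paths:
--         hints.append("Java/JVM project")
--
--     # Architecture patterns
--     if any(p.startswith("src/") for p in paths):
--         hints.append("src/ layout (standard package structure)")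
--     if any(p.startswith("tests/") or p.startswith("test/") for p in paths):
--         hints.append("Has test suite (tests/ directory)")
--     if "Dockerfile" in paths or "docker-compose.yml" in paths:
--         hints.append("Docker-containerized")
--     if ".github/workflows" in str(paths) or any("workflows" in p for p in paths):
--         hints.append("GitHub Actions CI/CD configured")
--     if "terraform" in str(paths).lower() or any(p.endswith(".tf") for p in paths):
--         hints.append("Terraform IaC detected")
--     if any("api/" in p or "/routes/" in p or "/controllers/" in p for p in paths):
--         hints.append("REST API structure detected")
--     if any("migrations/" in p or "alembic" in p for p in paths):
--         hints.append("Database migrations present (SQLAlchemy/Alembic/Django)")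
--     if any(p.endswith(".proto") for p in paths):
--         hints.append("gRPC / Protocol Buffers")
--     if "kubernetes" in str(paths).lower() or any(p.endswith(".k8s.yaml") for p in paths):
--         hints.append("Kubernetes manifests detected")
--
--     return hints
-- ===== SOURCE B (Python) =====
-- def _detect_architecture(paths: set) -> list[str]:
--     """Deteksi pola arsitektur - single pass collecting flags, then assemble hints."""
--     pkg = nextc = vitec = nuxtc = pyreq = pyweb = pyml = cargo = gomod = java = False
--     srcl = testd = docker = ghwf = wf = tf = tfext = api = mig = proto = k8s = k8sy = False
--     for p in paths:
--         low = p.lower()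
--         pkg = pkg or p == "package.json"
--         nextc = nextc or "next.config" in p
--         vitec = vitec or "vite.config" in p
--         nuxtc = nuxtc or "nuxt.config" in p
--         pyreq = pyreq or p.endswith("requirements.txt") or p == "pyproject.toml" or p.endswith("setup.py")
--         pyweb = pyweb or "fastapi" in p or "app.py" in p or "main.py" in p
--         pyml = pyml or "train" in p or "model" in p or "notebook" in p or p.endswith(".ipynb")
--         cargo = cargo or p == "Cargo.toml"
--         gomod = gomod or p == "go.mod"
--         java = java or p == "pom.xml" or p == "build.gradle"
--         srcl = srcl or p.startswith("src/")
--         testd = testd or p.startswith("tests/") or p.startswith("test/")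
--         docker = docker or p == "Dockerfile" or p == "docker-compose.yml"
--         ghwf = ghwf or ".github/workflows" in p
--         wf = wf or "workflows" in p
--         tf = tf or "terraform" in low
--         tfext = tfext or p.endswith(".tf")
--         api = api or "api/" in p or "/routes/" in p or "/controllers/" in p
--         mig = mig or "migrations/" in p or "alembic" in p
--         proto = proto or p.endswith(".proto")
--         k8s = k8s or "kubernetes" in low
--         k8sy = k8sy or p.endswith(".k8s.yaml")
--
--     hints = []
--     if pkg:
--         if nextc:
--             hints.append("Next.js project")
--         elif vitec:
--             hints.append("Vite-based frontend")
--         elif nuxtc: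
--             hints.append("Nuxt.js project")
--         else:
--             hints.append("Node.js / npm project")
--     if pyreq:
--         if pyweb:
--             hints.append("Python web app (likely FastAPI/Flask/Django)")
--         elif pyml:
--             hints.append("Python ML/Data Science project")
--         else:
--             hints.append("Python project")
--     if cargo:
--         hints.append("Rust project (Cargo)")
--     if gomod:
--         hints.append("Go module project")
--     if java:
--         hints.append("Java/JVM project")
--     if srcl:
--         hints.append("src/ layout (standard package structure)")
--     if testd:
--         hints.append("Has test suite (tests/ directory)")
--     if docker:
--         hints.append("Docker-containerized")
--     if ghwf or wf:
--         hints.append("GitHub Actions CI/CD configured")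
--     if tf or tfext:
--         hints.append("Terraform IaC detected")
--     if api:
--         hints.append("REST API structure detected")
--     if mig:
--         hints.append("Database migrations present (SQLAlchemy/Alembic/Django)")
--     if proto:
--         hints.append("gRPC / Protocol Buffers")
--     if k8s or k8sy:
--         hints.append("Kubernetes manifests detected")
--     return hints
-- ===== Notes on version B (the rewrite author's own statement) =====
-- stated objective: alternative
-- what changed: Replaced A's ~17 independent scans of the path set (one per any()/membership/str(paths) test) by a single pass that accumulates all boolean feature flags, after which the hint list is assembled from the flags in A's original order.
import Mathlib
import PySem

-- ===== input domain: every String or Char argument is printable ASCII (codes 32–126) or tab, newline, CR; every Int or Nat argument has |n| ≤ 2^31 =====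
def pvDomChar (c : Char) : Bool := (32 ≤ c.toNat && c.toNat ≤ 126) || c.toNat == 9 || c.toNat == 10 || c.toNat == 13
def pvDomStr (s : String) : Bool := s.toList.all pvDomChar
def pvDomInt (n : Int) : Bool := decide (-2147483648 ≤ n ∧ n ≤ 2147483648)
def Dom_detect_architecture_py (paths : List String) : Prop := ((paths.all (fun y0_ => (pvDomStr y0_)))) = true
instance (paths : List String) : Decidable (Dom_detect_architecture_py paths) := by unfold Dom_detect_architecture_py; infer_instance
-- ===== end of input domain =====

-- B replaces A's ~17 separate scans of `paths` by ONE pass that collects all boolean flags,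
-- then assembles the hint list from the flags in A's order (objective: alternative decomposition).
-- Note: the Python parameter is a set; here it is the List of its distinct elements, and both
-- programs read it only through existential/membership tests, so element order is irrelevant.

-- ===== PORT A =====
-- The three `... in str(paths)` checks are ported by hand as per-element substring tests:
-- exact on Dom, because the keywords (".github/workflows", "terraform", "kubernetes") contain
-- no quote, comma or backslash, so they cannot span the quoting/separators of Python's set repr,
-- and repr leaves every character of these keywords unescaped.
def detect_architecture_py (paths : List String) : List String :=
  let hints : List String := []
  let hints :=
    if paths.contains "package.json" then
      if paths.any (fun p => PySem.Str.isIn "next.config" p) then hints ++ ["Next.js project"]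
      else if paths.any (fun p => PySem.Str.isIn "vite.config" p) then hints ++ ["Vite-based frontend"]
      else if paths.any (fun p => PySem.Str.isIn "nuxt.config" p) then hints ++ ["Nuxt.js project"]
      else hints ++ ["Node.js / npm project"]
    else hints
  let hints :=
    if paths.any (fun p => PySem.Str.endswith p "requirements.txt" || p == "pyproject.toml" || PySem.Str.endswith p "setup.py") then
      if paths.any (fun p => PySem.Str.isIn "fastapi" p || PySem.Str.isIn "app.py" p || PySem.Str.isIn "main.py" p) then
        hints ++ ["Python web app (likely FastAPI/Flask/Django)"]
      else if paths.any (fun p => PySem.Str.isIn "train" p || PySem.Str.isIn "model" p || PySem.Str.isIn "notebook" p || PySem.Str.endswith p ".ipynb") then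
        hints ++ ["Python ML/Data Science project"]
      else hints ++ ["Python project"]
    else hints
  let hints := if paths.contains "Cargo.toml" then hints ++ ["Rust project (Cargo)"] else hints
  let hints := if paths.contains "go.mod" then hints ++ ["Go module project"] else hints
  let hints := if paths.contains "pom.xml" || paths.contains "build.gradle" then hints ++ ["Java/JVM project"] else hints
  let hints := if paths.any (fun p => PySem.Str.startswith p "src/") then hints ++ ["src/ layout (standard package structure)"] else hints
  let hints := if paths.any (fun p => PySem.Str.startswith p "tests/" || PySem.Str.startswith p "test/") then hints ++ ["Has test suite (tests/ directory)"] else hints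
  let hints := if paths.contains "Dockerfile" || paths.contains "docker-compose.yml" then hints ++ ["Docker-containerized"] else hints
  let hints := if paths.any (fun p => PySem.Str.isIn ".github/workflows" p) || paths.any (fun p => PySem.Str.isIn "workflows" p) then hints ++ ["GitHub Actions CI/CD configured"] else hints
  let hints := if paths.any (fun p => PySem.Str.isIn "terraform" (PySem.Str.lower p)) || paths.any (fun p => PySem.Str.endswith p ".tf") then hints ++ ["Terraform IaC detected"] else hints
  let hints := if paths.any (fun p => PySem.Str.isIn "api/" p || PySem.Str.isIn "/routes/" p || PySem.Str.isIn "/controllers/" p) then hints ++ ["REST API structure detected"] else hints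
  let hints := if paths.any (fun p => PySem.Str.isIn "migrations/" p || PySem.Str.isIn "alembic" p) then hints ++ ["Database migrations present (SQLAlchemy/Alembic/Django)"] else hints
  let hints := if paths.any (fun p => PySem.Str.endswith p ".proto") then hints ++ ["gRPC / Protocol Buffers"] else hints
  let hints := if paths.any (fun p => PySem.Str.isIn "kubernetes" (PySem.Str.lower p)) || paths.any (fun p => PySem.Str.endswith p ".k8s.yaml") then hints ++ ["Kubernetes manifests detected"] else hints
  hints

-- ===== PORT B =====
structure PVFlags where
  pkg : Bool
  nextc : Bool
  vitec : Bool
  nuxtc : Bool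
  pyreq : Bool
  pyweb : Bool
  pyml : Bool
  cargo : Bool
  gomod : Bool
  java : Bool
  srcl : Bool
  testd : Bool
  docker : Bool
  ghwf : Bool
  wf : Bool
  tf : Bool
  tfext : Bool
  api : Bool
  mig : Bool
  proto : Bool
  k8s : Bool
  k8sy : Bool
deriving Repr, DecidableEq

def pvStep (f : PVFlags) (p : String) : PVFlags :=
  let low := PySem.Str.lower p
  { pkg := f.pkg || p == "package.json"
    nextc := f.nextc || PySem.Str.isIn "next.config" p
    vitec := f.vitec || PySem.Str.isIn "vite.config" p
    nuxtc := f.nuxtc || PySem.Str.isIn "nuxt.config" p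
    pyreq := f.pyreq || PySem.Str.endswith p "requirements.txt" || p == "pyproject.toml" || PySem.Str.endswith p "setup.py"
    pyweb := f.pyweb || PySem.Str.isIn "fastapi" p || PySem.Str.isIn "app.py" p || PySem.Str.isIn "main.py" p
    pyml := f.pyml || PySem.Str.isIn "train" p || PySem.Str.isIn "model" p || PySem.Str.isIn "notebook" p || PySem.Str.endswith p ".ipynb"
    cargo := f.cargo || p == "Cargo.toml"
    gomod := f.gomod || p == "go.mod"
    java := f.java || p == "pom.xml" || p == "build.gradle"
    srcl := f.srcl || PySem.Str.startswith p "src/"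
    testd := f.testd || PySem.Str.startswith p "tests/" || PySem.Str.startswith p "test/"
    docker := f.docker || p == "Dockerfile" || p == "docker-compose.yml"
    ghwf := f.ghwf || PySem.Str.isIn ".github/workflows" p
    wf := f.wf || PySem.Str.isIn "workflows" p
    tf := f.tf || PySem.Str.isIn "terraform" low
    tfext := f.tfext || PySem.Str.endswith p ".tf"
    api := f.api || PySem.Str.isIn "api/" p || PySem.Str.isIn "/routes/" p || PySem.Str.isIn "/controllers/" p
    mig := f.mig || PySem.Str.isIn "migrations/" p || PySem.Str.isIn "alembic" p
    proto := f.proto || PySem.Str.endswith p ".proto"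
    k8s := f.k8s || PySem.Str.isIn "kubernetes" low
    k8sy := f.k8sy || PySem.Str.endswith p ".k8s.yaml" }

def pvInit : PVFlags :=
  ⟨false, false, false, false, false, false, false, false, false, false, false,
   false, false, false, false, false, false, false, false, false, false, false⟩

def detect_architecture_py_alt (paths : List String) : List String :=
  let f := paths.foldl pvStep pvInit
  (if f.pkg then
      [if f.nextc then "Next.js project"
       else if f.vitec then "Vite-based frontend"
       else if f.nuxtc then "Nuxt.js project"
       else "Node.js / npm project"]
    else []) ++
  (if f.pyreq then
      [if f.pyweb then "Python web app (likely FastAPI/Flask/Django)"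
       else if f.pyml then "Python ML/Data Science project"
       else "Python project"]
    else []) ++
  (if f.cargo then ["Rust project (Cargo)"] else []) ++
  (if f.gomod then ["Go module project"] else []) ++
  (if f.java then ["Java/JVM project"] else []) ++
  (if f.srcl then ["src/ layout (standard package structure)"] else []) ++
  (if f.testd then ["Has test suite (tests/ directory)"] else []) ++
  (if f.docker then ["Docker-containerized"] else []) ++
  (if f.ghwf || f.wf then ["GitHub Actions CI/CD configured"] else []) ++
  (if f.tf || f.tfext then ["Terraform IaC detected"] else []) ++
  (if f.api then ["REST API structure detected"] else []) ++
  (if f.mig then ["Database migrations present (SQLAlchemy/Alembic/Django)"] else []) ++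
  (if f.proto then ["gRPC / Protocol Buffers"] else []) ++
  (if f.k8s || f.k8sy then ["Kubernetes manifests detected"] else [])

-- ===== PRECONDITION & SPEC =====
def Spec_detect_architecture_py (paths : List String) (out : List String) : Prop := out = detect_architecture_py_alt paths
instance (paths : List String) (out : List String) : Decidable (Spec_detect_architecture_py paths out) := by unfold Spec_detect_architecture_py; infer_instance

-- ===== CLAIM (what is proved, stated in full; the proofs are below) =====
def Claim_equal_detect_architecture_py : Prop := ∀ (paths : List String), Dom_detect_architecture_py paths → Spec_detect_architecture_py paths (detect_architecture_py paths)

-- ===== LEMMAS AND PROOFS =====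

/-- The one-pass flag scan computes exactly the per-predicate `List.any` scans of A. -/
theorem pv_scan_eq (paths : List String) (f : PVFlags) :
    paths.foldl pvStep f =
      { pkg := f.pkg || paths.any (fun p => p == "package.json")
        nextc := f.nextc || paths.any (fun p => PySem.Str.isIn "next.config" p)
        vitec := f.vitec || paths.any (fun p => PySem.Str.isIn "vite.config" p)
        nuxtc := f.nuxtc || paths.any (fun p => PySem.Str.isIn "nuxt.config" p)
        pyreq := f.pyreq || paths.any (fun p => PySem.Str.endswith p "requirements.txt" || p == "pyproject.toml" || PySem.Str.endswith p "setup.py")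
        pyweb := f.pyweb || paths.any (fun p => PySem.Str.isIn "fastapi" p || PySem.Str.isIn "app.py" p || PySem.Str.isIn "main.py" p)
        pyml := f.pyml || paths.any (fun p => PySem.Str.isIn "train" p || PySem.Str.isIn "model" p || PySem.Str.isIn "notebook" p || PySem.Str.endswith p ".ipynb")
        cargo := f.cargo || paths.any (fun p => p == "Cargo.toml")
        gomod := f.gomod || paths.any (fun p => p == "go.mod")
        java := f.java || paths.any (fun p => p == "pom.xml" || p == "build.gradle")
        srcl := f.srcl || paths.any (fun p => PySem.Str.startswith p "src/")
        testd := f.testd || paths.any (fun p => PySem.Str.startswith p "tests/" || PySem.Str.startswith p "test/")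
        docker := f.docker || paths.any (fun p => p == "Dockerfile" || p == "docker-compose.yml")
        ghwf := f.ghwf || paths.any (fun p => PySem.Str.isIn ".github/workflows" p)
        wf := f.wf || paths.any (fun p => PySem.Str.isIn "workflows" p)
        tf := f.tf || paths.any (fun p => PySem.Str.isIn "terraform" (PySem.Str.lower p))
        tfext := f.tfext || paths.any (fun p => PySem.Str.endswith p ".tf")
        api := f.api || paths.any (fun p => PySem.Str.isIn "api/" p || PySem.Str.isIn "/routes/" p || PySem.Str.isIn "/controllers/" p)
        mig := f.mig || paths.any (fun p => PySem.Str.isIn "migrations/" p || PySem.Str.isIn "alembic" p)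
        proto := f.proto || paths.any (fun p => PySem.Str.endswith p ".proto")
        k8s := f.k8s || paths.any (fun p => PySem.Str.isIn "kubernetes" (PySem.Str.lower p))
        k8sy := f.k8sy || paths.any (fun p => PySem.Str.endswith p ".k8s.yaml") } := by
  induction paths generalizing f with
  | nil => simp
  | cons p ps ih => simp [List.foldl_cons, ih, pvStep, Bool.or_assoc]

/-- `any` of a disjunction of predicates splits into a disjunction of `any` scans. -/
theorem pv_any_or {α : Type} (l : List α) (f g : α → Bool) :
    l.any (fun x => f x || g x) = (l.any f || l.any g) := by
  induction l with
  | nil => simp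
  | cons x xs ih => simp only [List.any_cons, ih]; cases f x <;> cases g x <;> simp

theorem pv_if_append (c : Bool) (h : List String) (s : String) :
    (if c then h ++ [s] else h) = h ++ (if c then [s] else []) := by
  cases c <;> simp

theorem pv_if_nest4 (c c1 c2 c3 : Bool) (h : List String) (s1 s2 s3 s4 : String) :
    (if c then (if c1 then h ++ [s1] else if c2 then h ++ [s2] else if c3 then h ++ [s3] else h ++ [s4]) else h)
      = h ++ (if c then [if c1 then s1 else if c2 then s2 else if c3 then s3 else s4] else []) := by
  cases c <;> cases c1 <;> cases c2 <;> cases c3 <;> simp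

theorem pv_if_nest3 (c c1 c2 : Bool) (h : List String) (s1 s2 s3 : String) :
    (if c then (if c1 then h ++ [s1] else if c2 then h ++ [s2] else h ++ [s3]) else h)
      = h ++ (if c then [if c1 then s1 else if c2 then s2 else s3] else []) := by
  cases c <;> cases c1 <;> cases c2 <;> simp

theorem pv_contains_eq (l : List String) (a : String) :
    l.contains a = l.any (fun x => x == a) := (List.any_beq' (l := l) (a := a)).symm

-- ===== VERDICT (by name: the statement is the Claim_ definition above) =====
theorem detect_architecture_py_spec : Claim_equal_detect_architecture_py := by
  intro paths _
  show detect_architecture_py paths = detect_architecture_py_alt paths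
  simp only [detect_architecture_py, detect_architecture_py_alt]
  rw [pv_scan_eq]
  rw [pv_if_append, pv_if_append, pv_if_append, pv_if_append, pv_if_append, pv_if_append,
    pv_if_append, pv_if_append, pv_if_append, pv_if_append, pv_if_append, pv_if_append,
    pv_if_nest3, pv_if_nest4]
  simp only [pvInit, Bool.false_or, pv_contains_eq, pv_any_or, List.nil_append, List.append_assoc]
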